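-- pv_equiv track=rewrite | github.com/Stray777/Information-Security-Engineering-Training-2-DualMachine-Decryption | model.py | processsecretkey
-- ===== SOURCE A (Python) =====
-- def processsecretkey(s):
--     sLength = len(s)
--     tempList = []
--     for i in range(len(s)):
--         char = s[i]
--         # tempList存入密钥单词中字母的ascii码值
--         tempList.append(ord(char))
--     # tempList2用于存储密钥单词每个字母在列表的顺序
--     sKey = []
--     # sort_tempList用于存储排序后的tempList
--     sort_tempList = sorted(tempList)
--     for index_,value in enumerate(tempList):
--         sKey.append(sort_tempList.index(value)+1)
--
--     return sKey,sLength
-- ===== SOURCE B (Python) =====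
-- def processsecretkey(s):
--     sLength = len(s)
--     ranks = {}
--     for c in s:
--         if c not in ranks:
--             ranks[c] = sum(1 for d in s if ord(d) < ord(c)) + 1
--     sKey = [ranks[c] for c in s]
--     return sKey, sLength
-- ===== Notes on version B (the rewrite author's own statement) =====
-- stated objective: faster
-- what changed: Replaces the sort plus per-element sorted.index scan by a direct count of strictly smaller ordinals (sorted.index(v) = #smaller), computed once per distinct character in a memo dict instead of once per position.
import Mathlib
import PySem

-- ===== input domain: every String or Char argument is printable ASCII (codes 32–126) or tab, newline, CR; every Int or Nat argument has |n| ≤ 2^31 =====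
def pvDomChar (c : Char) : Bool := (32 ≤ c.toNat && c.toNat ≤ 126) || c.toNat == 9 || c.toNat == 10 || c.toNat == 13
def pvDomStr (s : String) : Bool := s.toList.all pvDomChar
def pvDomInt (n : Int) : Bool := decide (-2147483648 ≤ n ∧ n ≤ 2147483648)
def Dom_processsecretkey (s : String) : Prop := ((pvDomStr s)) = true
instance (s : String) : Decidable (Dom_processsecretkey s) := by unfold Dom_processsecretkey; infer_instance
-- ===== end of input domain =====

-- B replaces A's sort + per-position sorted.index scan by counting strictly smaller
-- ordinals, computed once per DISTINCT character via a memo dict (objective: faster).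

-- ===== PORT A =====
def processsecretkey (s : String) : List Int × Int :=
  let sLength := PySem.Str.len s
  -- for i in range(len(s)): tempList.append(ord(s[i]))
  let tempList : List Int :=
    (PySem.List.pyRange 0 sLength 1).foldl
      (fun acc i => acc ++ [((PySem.List.pyGetD s.toList i ' ').toNat : Int)]) []
  let sortTempList := PySem.List.sorted tempList (fun x => x) false
  -- for index_, value in enumerate(tempList): sKey.append(sort_tempList.index(value)+1)
  -- sort_tempList.index(value) never raises (value ∈ tempList, which sortTempList permutes)
  let sKey : List Int :=
    (PySem.List.enumerate tempList 0).foldl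
      (fun acc p => acc ++ [(((PySem.List.index? sortTempList p.2).getD 0 : Nat) : Int) + 1]) []
  (sKey, sLength)

-- ===== PORT B =====
def processsecretkey_alt (s : String) : List Int × Int :=
  let sLength := PySem.Str.len s
  let ranks : PySem.Dict Char Int :=
    s.toList.foldl (fun d c =>
      if d.contains c then d
      else d.insert c (((s.toList.countP (fun x => x.toNat < c.toNat)) : Int) + 1))
      PySem.Dict.empty
  -- ranks[c] never raises: every c of s was inserted by the loop
  let sKey : List Int := s.toList.map (fun c => (ranks.get? c).getD 0)
  (sKey, sLength)

-- ===== PRECONDITION & SPEC =====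
def Spec_processsecretkey (s : String) (out : List Int × Int) : Prop := out = processsecretkey_alt s
instance (s : String) (out : List Int × Int) : Decidable (Spec_processsecretkey s out) := by unfold Spec_processsecretkey; infer_instance

-- ===== CLAIM (what is proved, stated in full; the proofs are below) =====
def Claim_equal_processsecretkey : Prop := ∀ (s : String), Dom_processsecretkey s → Spec_processsecretkey s (processsecretkey s)

-- ===== LEMMAS AND PROOFS =====

-- in a non-decreasing list, the first index of a member equals the number of strictly smaller elements
theorem index?_sorted_eq_countP (ys : List Int) (v : Int)
    (hp : ys.Pairwise (· ≤ ·)) (hv : v ∈ ys) :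
    PySem.List.index? ys v = some (ys.countP (fun d => d < v)) := by
  induction ys with
  | nil => cases hv
  | cons y t ih =>
    rcases List.pairwise_cons.mp hp with ⟨hy, ht⟩
    by_cases hyv : y = v
    · subst hyv
      have hz : t.countP (fun d => d < y) = 0 := by
        apply List.countP_eq_zero.mpr
        intro z hz
        simpa using not_lt.mpr (hy z hz)
      rw [PySem.List.index?_cons_self]
      simp [hz]
    · have hvt : v ∈ t := by cases hv with
        | head => exact absurd rfl hyv
        | tail _ h => exact h
      have hylt : y < v := lt_of_le_of_ne (hy v hvt) hyv
      rw [PySem.List.index?_cons_of_ne t hyv, ih ht hvt]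
      simp [hylt]

-- the memo loop stores f c at key c for every c of l (and disturbs no other key)
theorem get?_memo_foldl (f : Char → Int) (l : List Char) (d : PySem.Dict Char Int) (c : Char) :
    (l.foldl (fun d c => if d.contains c then d else d.insert c (f c)) d).get? c
      = if (d.get? c).isSome then d.get? c else (if c ∈ l then some (f c) else none) := by
  induction l generalizing d with
  | nil =>
    by_cases h : (d.get? c).isSome
    · simp [h]
    · simp [Option.not_isSome_iff_eq_none.mp h]
  | cons a t ih =>
    simp only [List.foldl_cons]
    by_cases ha : d.contains a
    · rw [if_pos ha, ih]
      by_cases hc : (d.get? c).isSome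
      · simp [hc]
      · simp only [hc, Bool.false_eq_true, if_false]
        by_cases hca : c = a
        · subst hca
          rw [PySem.Dict.contains_eq_isSome_get?] at ha
          exact absurd ha hc
        · simp [List.mem_cons, hca]
    · rw [if_neg ha, ih]
      by_cases hca : c = a
      · subst hca
        rw [PySem.Dict.contains_eq_isSome_get?] at ha
        simp [PySem.Dict.get?_insert_self, Option.not_isSome_iff_eq_none.mp ha]
      · simp only [PySem.Dict.get?_insert_of_ne d (f a) hca]
        simp [List.mem_cons, hca]

theorem processsecretkey_eq (s : String) : processsecretkey s = processsecretkey_alt s := by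
  unfold processsecretkey processsecretkey_alt
  simp only [PySem.Str.len_eq]
  rw [PySem.List.foldl_pyRange_zero_pyGetD' s.toList ' ' (fun acc c => acc ++ [((c.toNat : Int))]) []]
  simp only [PySem.List.foldl_append_singleton_eq_map, List.nil_append]
  set ords : List Int := s.toList.map (fun c => (c.toNat : Int)) with hords
  have hperm : (PySem.List.sorted ords (fun x => x) false).Perm ords :=
    PySem.List.sorted_perm ords (fun x => x) false
  refine Prod.ext ?_ rfl
  simp only []
  -- reduce the enumerate view to a map over ords (only the value component is used)
  rw [show (fun (p : Int × Int) => (((PySem.List.index? (PySem.List.sorted ords (fun x => x) false) p.2).getD 0 : Nat) : Int) + 1)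
      = (fun v => (((PySem.List.index? (PySem.List.sorted ords (fun x => x) false) v).getD 0 : Nat) : Int) + 1) ∘ (fun p : Int × Int => p.2) from rfl,
    ← List.map_map, PySem.List.map_snd_enumerate]
  rw [hords, List.map_map]
  apply List.map_congr_left
  intro c hc
  have hmem : ((c.toNat : Int)) ∈ ords := by
    rw [hords]; exact List.mem_map_of_mem hc
  have hcount : (PySem.List.sorted ords (fun x => x) false).countP (fun d => d < (c.toNat : Int))
      = ords.countP (fun d => d < (c.toNat : Int)) := hperm.countP_eq _
  rw [Function.comp_apply,
    index?_sorted_eq_countP _ _ (PySem.List.sorted_pairwise ords (fun x => x)) (hperm.mem_iff.mpr hmem)]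
  simp only [Option.getD_some, hcount]
  rw [get?_memo_foldl (fun c => (((s.toList.countP (fun x => x.toNat < c.toNat)) : Int) + 1))
    s.toList PySem.Dict.empty c]
  simp only [PySem.Dict.get?_empty, Option.isSome_none, Bool.false_eq_true, if_false, hc,
    if_true, Option.getD_some]
  rw [hords, List.countP_map]
  simp [Function.comp_def]

-- ===== VERDICT (by name: the statement is the Claim_ definition above) =====
theorem processsecretkey_spec : Claim_equal_processsecretkey := by
  intro s _
  unfold Spec_processsecretkey
  exact processsecretkey_eq s
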